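-- pv_equiv track=rewrite | github.com/ctsit/qipr_approver | qipr_approver/approver/parsers/people_ingest/actions.py | build_field_index_map
-- ===== SOURCE A (Python) =====
-- def build_field_index_map(acc, header_line):
--     model_mapping = {
--         'display_name': 'display_name',
--         'first_name': 'first_name',
--         'gatorlink': 'gatorlink',
--         'last_name': 'last_name',
--         'middle_name': 'middle_name',
--         'name_prefix': 'name_prefix',
--         'name_suffix': 'name_suffix',
--         'uf_business_email': 'business_email',
--         'uf_business_fax': 'business_fax',
--         'uf_business_phone': 'business_phone',
--         'workingtitle': 'working_title',
--     }
--     csv_fields = [field.lower().strip() for field in header_line.split('|')]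
--     field_index_map = {}
--     for field in csv_fields:
--         if model_mapping.get(field):
--             field_index_map[str(csv_fields.index(field))] = model_mapping.get(field)
--     return field_index_map
-- ===== SOURCE B (Python) =====
-- def build_field_index_map(acc, header_line):
--     model_mapping = {
--         'display_name': 'display_name',
--         'first_name': 'first_name',
--         'gatorlink': 'gatorlink',
--         'last_name': 'last_name',
--         'middle_name': 'middle_name',
--         'name_prefix': 'name_prefix',
--         'name_suffix': 'name_suffix',
--         'uf_business_email': 'business_email',
--         'uf_business_fax': 'business_fax',
--         'uf_business_phone': 'business_phone',
--         'workingtitle': 'working_title',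
--     }
--     csv_fields = [field.lower().strip() for field in header_line.split('|')]
--     # drive the loop over the (constant) mapping instead of the header:
--     # first column index of each recognized mapping key, ...
--     wanted = {csv_fields.index(key): value
--               for key, value in model_mapping.items() if key in csv_fields}
--     # ... then emit the entries in ascending column order (A's insertion order)
--     return {str(i): wanted[i] for i in range(len(csv_fields)) if i in wanted}
-- ===== Notes on version B (the rewrite author's own statement) =====
-- stated objective: alternative
-- what changed: B inverts the loop: it drives over the constant model_mapping to build a first-index->value dict via csv_fields.index, then emits entries in ascending column order with one range pass, instead of A's single pass over csv_fields with a mapping lookup and an index rescan per matched column.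
import Mathlib
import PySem

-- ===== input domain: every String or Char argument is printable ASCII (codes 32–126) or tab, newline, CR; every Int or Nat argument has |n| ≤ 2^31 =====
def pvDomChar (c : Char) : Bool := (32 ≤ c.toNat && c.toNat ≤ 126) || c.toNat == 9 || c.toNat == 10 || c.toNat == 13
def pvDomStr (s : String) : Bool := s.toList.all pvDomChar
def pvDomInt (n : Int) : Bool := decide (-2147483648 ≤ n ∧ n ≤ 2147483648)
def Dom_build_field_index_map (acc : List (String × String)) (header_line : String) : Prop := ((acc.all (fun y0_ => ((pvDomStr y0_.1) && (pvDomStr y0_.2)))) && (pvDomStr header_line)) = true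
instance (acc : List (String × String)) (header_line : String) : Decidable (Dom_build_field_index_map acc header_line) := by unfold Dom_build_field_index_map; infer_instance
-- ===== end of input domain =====

-- B inverts the loop: it drives over the constant model_mapping building a first-index→value dict,
-- then emits the entries in ascending column order with one range pass ('acc' is unused by both).

-- ===== PORT A =====
-- the model_mapping literal (the same dict literal appears in both sources, so both ports share it)
def pvMapping : PySem.Dict String String := PySem.Dict.ofList [
  ("display_name", "display_name"),
  ("first_name", "first_name"),
  ("gatorlink", "gatorlink"),
  ("last_name", "last_name"),
  ("middle_name", "middle_name"),
  ("name_prefix", "name_prefix"),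
  ("name_suffix", "name_suffix"),
  ("uf_business_email", "business_email"),
  ("uf_business_fax", "business_fax"),
  ("uf_business_phone", "business_phone"),
  ("workingtitle", "working_title")]

-- field.lower().strip()
def pvNorm (f : String) : String := PySem.Str.strip (PySem.Str.lower f)

-- loop body of A: 'if model_mapping.get(field): field_index_map[str(csv_fields.index(field))] = model_mapping.get(field)'
-- ('if model_mapping.get(field):' is truthiness — None and "" are falsy; the index? none branch is unreachable
-- since field was drawn from csv_fields)
def pvStepA (csv : List String) (d : PySem.Dict String String) (field : String) : PySem.Dict String String :=
  match pvMapping.get? field with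
  | some v =>
      if v ≠ "" then
        match PySem.List.index? csv field with
        | some i => d.insert (PySem.Int.toStr (i : Int)) v
        | none => d
      else d
  | none => d

def build_field_index_map (acc : List (String × String)) (header_line : String) : List (String × String) :=
  -- header_line.split('|'): split? is none only for an empty separator, so getD [] is exact here
  let csv_fields := ((PySem.Str.split? header_line "|").getD []).map pvNorm
  (csv_fields.foldl (pvStepA csv_fields) PySem.Dict.empty).items

-- ===== PORT B =====
-- first loop of B: 'wanted = {csv_fields.index(key): value for key, value in model_mapping.items() if key in csv_fields}'
-- (the index? getD 0 branch is unreachable: key ∈ csv_fields was just tested)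
def pvStepW (csv : List String) (w : PySem.Dict Int String) (p : String × String) : PySem.Dict Int String :=
  if csv.contains p.1 then
    w.insert (((PySem.List.index? csv p.1).getD 0 : Nat) : Int) p.2
  else w

-- second loop of B: '{str(i): wanted[i] for i in range(len(csv_fields)) if i in wanted}'
-- ('wanted[i]' is guarded by 'i in wanted', so getD "" is exact)
def pvStepR (w : PySem.Dict Int String) (d : PySem.Dict String String) (i : Int) : PySem.Dict String String :=
  if w.contains i then d.insert (PySem.Int.toStr i) (w.getD i "") else d

def build_field_index_map_alt (acc : List (String × String)) (header_line : String) : List (String × String) :=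
  let csv_fields := ((PySem.Str.split? header_line "|").getD []).map pvNorm
  let wanted := pvMapping.items.foldl (pvStepW csv_fields) PySem.Dict.empty
  ((PySem.List.pyRange 0 (csv_fields.length : Int) 1).foldl (pvStepR wanted) PySem.Dict.empty).items

-- ===== PRECONDITION & SPEC =====
def Spec_build_field_index_map (acc : List (String × String)) (header_line : String) (out : List (String × String)) : Prop := out = build_field_index_map_alt acc header_line
instance (acc : List (String × String)) (header_line : String) (out : List (String × String)) : Decidable (Spec_build_field_index_map acc header_line out) := by unfold Spec_build_field_index_map; infer_instance

-- ===== CLAIM (what is proved, stated in full; the proofs are below) =====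
def Claim_equal_build_field_index_map : Prop := ∀ (acc : List (String × String)) (header_line : String), Dom_build_field_index_map acc header_line → Spec_build_field_index_map acc header_line (build_field_index_map acc header_line)

-- ===== LEMMAS AND PROOFS =====

-- str(n) is injective on the nonnegative integers: a decimal parser is a left inverse of Nat.toDigits.
def pvParse (a : Nat) (cs : List Char) : Nat := cs.foldl (fun a c => a * 10 + (c.toNat - 48)) a

lemma pvDigitChar (k : Nat) (h : k < 10) : (Nat.digitChar k).toNat - 48 = k := by
  interval_cases k <;> rfl

lemma pvParse_toDigitsCore : ∀ (f n : Nat) (acc : List Char), n < f →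
    pvParse 0 (Nat.toDigitsCore 10 f n acc) = pvParse n acc := by
  intro f
  induction f with
  | zero => omega
  | succ f ih =>
    intro n acc hn
    have heq : Nat.toDigitsCore 10 (f+1) n acc
        = if n / 10 = 0 then (n % 10).digitChar :: acc
          else Nat.toDigitsCore 10 f (n / 10) ((n % 10).digitChar :: acc) := by
      rw [Nat.toDigitsCore]
    rw [heq]
    by_cases h0 : n / 10 = 0
    · rw [if_pos h0]
      show pvParse (0 * 10 + ((Nat.digitChar (n % 10)).toNat - 48)) acc = pvParse n acc
      rw [pvDigitChar _ (Nat.mod_lt _ (by omega))]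
      have := Nat.div_add_mod n 10
      congr 1
      omega
    · rw [if_neg h0]
      have hlt : n / 10 < f := by
        have h1 : n / 10 < n := Nat.div_lt_self (by omega) (by omega)
        omega
      rw [ih _ _ hlt]
      show pvParse (n / 10 * 10 + ((Nat.digitChar (n % 10)).toNat - 48)) acc = pvParse n acc
      rw [pvDigitChar _ (Nat.mod_lt _ (by omega))]
      have := Nat.div_add_mod n 10
      congr 1
      omega

lemma pvToDigits_inj {m n : Nat} (h : Nat.toDigits 10 m = Nat.toDigits 10 n) : m = n := by
  have hm := pvParse_toDigitsCore (m + 1) m [] (by omega)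
  have hn := pvParse_toDigitsCore (n + 1) n [] (by omega)
  unfold Nat.toDigits at h
  rw [h] at hm
  simpa [pvParse] using hm.symm.trans hn

lemma pvToStr_inj {m n : Nat} (h : PySem.Int.toStr (m : Int) = PySem.Int.toStr (n : Int)) : m = n := by
  have h2 : PySem.Int.toChars (m : Int) = PySem.Int.toChars (n : Int) := by
    have := congrArg String.toList h
    simpa [PySem.Int.toList_toStr] using this
  simp only [PySem.Int.toChars] at h2
  rw [if_neg (by omega), if_neg (by omega)] at h2
  apply pvToDigits_inj
  simpa using h2

-- every value of the mapping is nonempty, so A's truthiness test always passes on a hit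
lemma pvMapping_get?_ne_empty {f v : String} (h : pvMapping.get? f = some v) : v ≠ "" := by
  have hm := PySem.Dict.mem_items_of_get?_eq_some _ h
  have hit : pvMapping.items = [
    ("display_name", "display_name"), ("first_name", "first_name"), ("gatorlink", "gatorlink"),
    ("last_name", "last_name"), ("middle_name", "middle_name"), ("name_prefix", "name_prefix"),
    ("name_suffix", "name_suffix"), ("uf_business_email", "business_email"),
    ("uf_business_fax", "business_fax"), ("uf_business_phone", "business_phone"),
    ("workingtitle", "working_title")] := by decide
  rw [hit] at hm
  simp only [List.mem_cons, List.not_mem_nil, or_false, Prod.mk.injEq] at hm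
  rcases hm with ⟨_, h2⟩|⟨_, h2⟩|⟨_, h2⟩|⟨_, h2⟩|⟨_, h2⟩|⟨_, h2⟩|⟨_, h2⟩|⟨_, h2⟩|⟨_, h2⟩|⟨_, h2⟩|⟨_, h2⟩ <;>
    subst h2 <;> decide

lemma pvMapping_keys_nodup : pvMapping.keys.Nodup := by decide

-- pairs of the mapping literal with the same key are equal
lemma pvMapping_items_inj {p q : String × String} (hp : p ∈ pvMapping.items)
    (hq : q ∈ pvMapping.items) (h : p.1 = q.1) : p = q := by
  have hit : pvMapping.items = [
    ("display_name", "display_name"), ("first_name", "first_name"), ("gatorlink", "gatorlink"),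
    ("last_name", "last_name"), ("middle_name", "middle_name"), ("name_prefix", "name_prefix"),
    ("name_suffix", "name_suffix"), ("uf_business_email", "business_email"),
    ("uf_business_fax", "business_fax"), ("uf_business_phone", "business_phone"),
    ("workingtitle", "working_title")] := by decide
  rw [hit] at hp hq
  fin_cases hp <;> fin_cases hq <;> first | rfl | (exfalso; exact absurd h (by decide))

-- inserting a binding that is already present is a no-op
lemma pvInsert_self {d : PySem.Dict String String} {k v : String}
    (hn : d.keys.Nodup) (h : d.get? k = some v) : d.insert k v = d := by
  apply PySem.Dict.ext
  rw [PySem.Dict.items_insert_of_contains _ _ (by rw [PySem.Dict.contains_eq_isSome_get?, h]; rfl)]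
  have : ∀ p ∈ d.items, (if p.1 == k then (k, v) else p) = p := by
    intro p hp
    by_cases hk : p.1 == k
    · rw [if_pos hk]
      have hg := PySem.Dict.get?_of_mem_items _ hp hn
      rw [eq_of_beq hk] at hg
      rw [hg] at h
      obtain rfl := Option.some.injEq _ _ ▸ h
      have : p = (p.1, p.2) := rfl
      rw [eq_of_beq hk] at this
      exact this.symm ▸ rfl
    · rw [if_neg hk]
  calc d.items.map (fun p => if p.1 == k then (k, v) else p) = d.items.map id := List.map_congr_left this
    _ = d.items := List.map_id _

-- index i of csv holds a mapped field whose FIRST occurrence is i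
def pvGood (csv : List String) (i : Nat) : Bool :=
  pvMapping.contains (csv.getD i "") && (PySem.List.index? csv (csv.getD i "") == some i)

def pvVal (csv : List String) (i : Nat) : String := pvMapping.getD (csv.getD i "") ""

-- the common characterisation both ports are reduced to: first occurrences of mapped
-- fields among the first n columns, in ascending column order
def pvCanon (csv : List String) (n : Nat) : List (String × String) :=
  ((List.range n).filter (pvGood csv)).map (fun (i : Nat) => (PySem.Int.toStr (i : Int), pvVal csv i))

lemma pvCanon_succ (csv : List String) (n : Nat) :
    pvCanon csv (n + 1) = pvCanon csv n
      ++ (if pvGood csv n then [(PySem.Int.toStr (n : Int), pvVal csv n)] else []) := by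
  unfold pvCanon
  rw [List.range_succ, List.filter_append, List.map_append]
  by_cases h : pvGood csv n <;> simp [h]

lemma pvCanon_mem {csv : List String} {n : Nat} {x : String × String} :
    x ∈ pvCanon csv n ↔ ∃ i, i < n ∧ pvGood csv i
      ∧ x = (PySem.Int.toStr (i : Int), pvVal csv i) := by
  unfold pvCanon
  simp only [List.mem_map, List.mem_filter, List.mem_range]
  constructor
  · rintro ⟨i, ⟨hi, hg⟩, rfl⟩; exact ⟨i, hi, hg, rfl⟩
  · rintro ⟨i, hi, hg, rfl⟩; exact ⟨i, ⟨hi, hg⟩, rfl⟩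

lemma pvCanon_keys_nodup (csv : List String) (n : Nat) :
    ((pvCanon csv n).map Prod.fst).Nodup := by
  unfold pvCanon
  rw [List.map_map]
  apply List.Nodup.map_on
  · intro i hi j hj h
    exact pvToStr_inj h
  · exact (List.nodup_range).filter _

lemma pvCanon_not_contains (csv : List String) (n : Nat)
    {d : PySem.Dict String String} (hd : d.items = pvCanon csv n) :
    d.contains (PySem.Int.toStr (n : Int)) = false := by
  rw [Bool.eq_false_iff]
  intro hc
  have hk := (PySem.Dict.contains_iff_mem_keys _ _).mp hc
  have : d.keys = (pvCanon csv n).map Prod.fst := by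
    rw [PySem.Dict.keys, hd]
  rw [this, List.mem_map] at hk
  obtain ⟨x, hx, hfst⟩ := hk
  obtain ⟨i, hi, _, rfl⟩ := pvCanon_mem.mp hx
  have := pvToStr_inj hfst
  omega

lemma pvCanon_nodup_keys (csv : List String) (n : Nat)
    {d : PySem.Dict String String} (hd : d.items = pvCanon csv n) : d.keys.Nodup := by
  have : d.keys = (pvCanon csv n).map Prod.fst := by rw [PySem.Dict.keys, hd]
  rw [this]; exact pvCanon_keys_nodup csv n

-- ===== A side: the fold over csv_fields produces pvCanon =====

lemma pvMainA : ∀ (suf pre : List String) (d : PySem.Dict String String),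
    d.items = pvCanon (pre ++ suf) pre.length →
    (suf.foldl (pvStepA (pre ++ suf)) d).items = pvCanon (pre ++ suf) (pre ++ suf).length := by
  intro suf
  induction suf with
  | nil => intro pre d hd; simpa using hd
  | cons f rest ih =>
    intro pre d hd
    rw [List.foldl_cons]
    have hl : pre ++ f :: rest = (pre ++ [f]) ++ rest := by simp
    have hlen : (pre ++ [f]).length = pre.length + 1 := by simp
    have hget0 : (pre ++ f :: rest).getD pre.length "" = f := by
      rw [List.getD_eq_getElem?_getD, List.getElem?_append_right (le_refl _)]
      simp
    by_cases hc : pvMapping.contains f = true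
    · obtain ⟨v, hv⟩ : ∃ v, pvMapping.get? f = some v := by
        rw [PySem.Dict.contains_eq_isSome_get?] at hc
        exact Option.isSome_iff_exists.mp hc
      have hvne := pvMapping_get?_ne_empty hv
      have hgetD : pvMapping.getD f "" = v := PySem.Dict.getD_of_get?_eq_some _ _ hv
      by_cases hf : f ∈ pre
      · -- duplicate mapped field: A's re-insert is a no-op, index pre.length is not good
        have hidx : PySem.List.index? (pre ++ f :: rest) f = PySem.List.index? pre f :=
          PySem.List.index?_append_of_mem _ hf
        obtain ⟨j, hj⟩ := Option.isSome_iff_exists.mp ((PySem.List.index?_isSome_iff _ _).mpr hf)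
        have hjlt : j < pre.length := by
          obtain ⟨p', s', hps, hpl, _⟩ := (PySem.List.index?_eq_some_iff _ _ _).mp hj
          rw [hps]; simp; omega
        have hgetj : (pre ++ f :: rest).getD j "" = f := by
          obtain ⟨p', s', hps, hpl, _⟩ := (PySem.List.index?_eq_some_iff _ _ _).mp
            (hidx.trans hj)
          rw [hps, List.getD_eq_getElem?_getD, ← hpl, List.getElem?_append_right (le_refl _)]
          simp
        have hgoodj : pvGood (pre ++ f :: rest) j = true := by
          unfold pvGood
          rw [hgetj, hidx, hj]
          simp [hc]
        have hvalj : pvVal (pre ++ f :: rest) j = v := by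
          unfold pvVal; rw [hgetj, hgetD]
        have hmemitems : (PySem.Int.toStr (j : Int), v) ∈ d.items := by
          rw [hd]
          exact pvCanon_mem.mpr ⟨j, hjlt, hgoodj, by rw [hvalj]⟩
        have hnodup := pvCanon_nodup_keys _ _ hd
        have hA : pvStepA (pre ++ f :: rest) d f = d := by
          simp only [pvStepA, hv, if_pos hvne, hidx, hj]
          exact pvInsert_self hnodup (PySem.Dict.get?_of_mem_items _ hmemitems hnodup)
        have hgood0 : pvGood (pre ++ f :: rest) pre.length = false := by
          unfold pvGood
          rw [hget0, hidx, hj]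
          have : (some j == some pre.length) = false := by
            simp; omega
          simp only [this, Bool.and_false]
        rw [hA, hl]
        apply ih (pre ++ [f]) d
        rw [hd, hlen, ← hl, pvCanon_succ, hgood0]
        simp
      · -- first occurrence of a mapped field: A appends the new binding
        have hidx : PySem.List.index? (pre ++ f :: rest) f = some pre.length :=
          (PySem.List.index?_eq_some_iff _ _ _).mpr ⟨pre, rest, rfl, rfl, hf⟩
        have hgood0 : pvGood (pre ++ f :: rest) pre.length = true := by
          unfold pvGood
          rw [hget0, hidx]
          simp [hc]
        have hval0 : pvVal (pre ++ f :: rest) pre.length = v := by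
          unfold pvVal; rw [hget0, hgetD]
        have hA : pvStepA (pre ++ f :: rest) d f
            = d.insert (PySem.Int.toStr (pre.length : Int)) v := by
          simp only [pvStepA, hv, if_pos hvne, hidx]
        rw [hA, hl]
        apply ih (pre ++ [f])
        rw [PySem.Dict.items_insert_of_not_contains _ _ (pvCanon_not_contains _ _ hd), hd,
          hlen, ← hl, pvCanon_succ, hgood0, hval0]
        simp
    · -- unmapped field: both the step and the canon extension are trivial
      have hcf : pvMapping.contains f = false := Bool.eq_false_iff.mpr hc
      have hget : pvMapping.get? f = none := by
        rw [PySem.Dict.contains_eq_isSome_get?] at hcf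
        exact Option.not_isSome_iff_eq_none.mp (by simp [hcf])
      have hA : pvStepA (pre ++ f :: rest) d f = d := by
        simp [pvStepA, hget]
      have hgood0 : pvGood (pre ++ f :: rest) pre.length = false := by
        unfold pvGood
        rw [hget0, hcf]
        simp
      rw [hA, hl]
      apply ih (pre ++ [f]) d
      rw [hd, hlen, ← hl, pvCanon_succ, hgood0]
      simp

-- ===== B side: wanted, then the range pass, produce pvCanon =====

def pvWanted (csv : List String) : PySem.Dict Int String :=
  pvMapping.items.foldl (pvStepW csv) PySem.Dict.empty

def pvKeyOf (csv : List String) (p : String × String) : Int :=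
  (((PySem.List.index? csv p.1).getD 0 : Nat) : Int)

lemma pvKeys_nodup (csv : List String) :
    ((pvMapping.items.filter (fun p => csv.contains p.1)).map (pvKeyOf csv)).Nodup := by
  apply List.Nodup.map_on
  · intro p hp q hq h
    have hpm := (List.mem_filter.mp hp)
    have hqm := (List.mem_filter.mp hq)
    have hpc : p.1 ∈ csv := by simpa using hpm.2
    have hqc : q.1 ∈ csv := by simpa using hqm.2
    obtain ⟨jp, hjp⟩ := Option.isSome_iff_exists.mp ((PySem.List.index?_isSome_iff _ _).mpr hpc)
    obtain ⟨jq, hjq⟩ := Option.isSome_iff_exists.mp ((PySem.List.index?_isSome_iff _ _).mpr hqc)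
    have hj : jp = jq := by
      unfold pvKeyOf at h
      rw [hjp, hjq] at h
      simpa using h
    obtain ⟨hplt, hpel, _⟩ := PySem.List.getElem_of_index?_eq_some hjp
    obtain ⟨hqlt, hqel, _⟩ := PySem.List.getElem_of_index?_eq_some hjq
    apply pvMapping_items_inj hpm.1 hqm.1
    rw [← hpel, ← hqel]
    subst hj
    rfl
  · apply List.Nodup.filter
    have := pvMapping_keys_nodup
    rw [PySem.Dict.keys] at this
    exact this.of_map _

lemma pvWanted_items (csv : List String) :
    (pvWanted csv).items
      = (pvMapping.items.filter (fun p => csv.contains p.1)).map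
          (fun p => (pvKeyOf csv p, p.2)) := by
  unfold pvWanted
  have hstep : pvMapping.items.foldl (pvStepW csv) PySem.Dict.empty
      = pvMapping.items.foldl
          (fun w p => if csv.contains p.1 then w.insert (pvKeyOf csv p) p.2 else w)
          PySem.Dict.empty := rfl
  rw [hstep, PySem.List.foldl_if_eq_foldl_filter]
  have := PySem.Dict.items_foldl_insert_fresh
    (l := pvMapping.items.filter (fun p => csv.contains p.1))
    (k := pvKeyOf csv) (v := Prod.snd) (d := PySem.Dict.empty)
    (by intro a _; exact PySem.Dict.contains_empty _)
    (pvKeys_nodup csv)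
  simpa using this

lemma pvWanted_nodup (csv : List String) : (pvWanted csv).keys.Nodup := by
  have hk : (pvWanted csv).keys = (pvWanted csv).items.map Prod.fst := rfl
  rw [hk, pvWanted_items, List.map_map]
  exact pvKeys_nodup csv

lemma pvWanted_get? (csv : List String) (i : Nat) :
    (pvWanted csv).get? (i : Int)
      = if pvGood csv i then some (pvVal csv i) else none := by
  by_cases hg : pvGood csv i = true
  · rw [if_pos hg]
    unfold pvGood at hg
    obtain ⟨hc, hidx⟩ := Bool.and_eq_true_iff.mp hg
    set f := csv.getD i "" with hfdef
    obtain ⟨v, hv⟩ : ∃ v, pvMapping.get? f = some v := by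
      rw [PySem.Dict.contains_eq_isSome_get?] at hc
      exact Option.isSome_iff_exists.mp hc
    have hidx' : PySem.List.index? csv f = some i := by
      simpa using hidx
    have hfmem : f ∈ csv := (PySem.List.index?_isSome_iff _ _).mp (by rw [hidx']; rfl)
    have hpair : ((i : Int), v) ∈ (pvWanted csv).items := by
      rw [pvWanted_items, List.mem_map]
      refine ⟨(f, v), List.mem_filter.mpr ⟨PySem.Dict.mem_items_of_get?_eq_some _ hv, by simpa using hfmem⟩, ?_⟩
      unfold pvKeyOf
      rw [hidx']
      rfl
    rw [PySem.Dict.get?_of_mem_items _ hpair (pvWanted_nodup csv)]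
    unfold pvVal
    rw [← hfdef, PySem.Dict.getD_of_get?_eq_some _ _ hv]
  · rw [if_neg hg]
    rw [PySem.Dict.get?_eq_none_iff_not_mem_keys]
    intro hk
    have : (pvWanted csv).keys = (pvWanted csv).items.map Prod.fst := rfl
    rw [this, pvWanted_items, List.map_map, List.mem_map] at hk
    obtain ⟨p, hp, hkey⟩ := hk
    obtain ⟨hpm, hpc⟩ := List.mem_filter.mp hp
    have hpmem : p.1 ∈ csv := by simpa using hpc
    obtain ⟨j, hj⟩ := Option.isSome_iff_exists.mp ((PySem.List.index?_isSome_iff _ _).mpr hpmem)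
    have hji : j = i := by
      have : pvKeyOf csv p = (i : Int) := hkey
      unfold pvKeyOf at this
      rw [hj] at this
      simpa using this
    subst hji
    obtain ⟨hjlt, hjel, _⟩ := PySem.List.getElem_of_index?_eq_some hj
    have hgetd : csv.getD j "" = p.1 := by
      rw [List.getD_eq_getElem?_getD, List.getElem?_eq_getElem hjlt, hjel]
      rfl
    apply hg
    unfold pvGood
    rw [hgetd, hj]
    have hcont : pvMapping.contains p.1 = true := by
      rw [PySem.Dict.contains_eq_isSome_get?,
        PySem.Dict.get?_of_mem_items _ hpm pvMapping_keys_nodup]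
      rfl
    simp [hcont]

lemma pvWanted_contains (csv : List String) (i : Nat) :
    (pvWanted csv).contains (i : Int) = pvGood csv i := by
  rw [PySem.Dict.contains_eq_isSome_get?, pvWanted_get?]
  by_cases hg : pvGood csv i = true <;> simp [hg]

lemma pvMainB : ∀ (n : Nat) (csv : List String),
    ((PySem.List.pyRange 0 (n : Int) 1).foldl (pvStepR (pvWanted csv)) PySem.Dict.empty).items
      = pvCanon csv n := by
  intro n csv
  induction n with
  | zero => rfl
  | succ m ih =>
    have hr : PySem.List.pyRange 0 ((m + 1 : Nat) : Int) 1
        = PySem.List.pyRange 0 (m : Int) 1 ++ [(m : Int)] := by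
      have := PySem.List.pyRange_one_succ_right (a := 0) (b := (m : Int)) (by positivity)
      rw [← this]
      norm_num
    rw [hr, List.foldl_append, List.foldl_cons, List.foldl_nil]
    set d := (PySem.List.pyRange 0 (m : Int) 1).foldl (pvStepR (pvWanted csv)) PySem.Dict.empty
    unfold pvStepR
    rw [pvWanted_contains, pvCanon_succ]
    by_cases hg : pvGood csv m = true
    · rw [if_pos hg, PySem.Dict.items_insert_of_not_contains _ _ (pvCanon_not_contains _ _ ih),
        ih]
      have : (pvWanted csv).getD (m : Int) "" = pvVal csv m := by
        rw [PySem.Dict.getD_eq_get?_getD, pvWanted_get?, if_pos hg]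
        rfl
      rw [this, hg]
      simp
    · rw [if_neg hg, ih, Bool.eq_false_iff.mpr hg]
      simp

-- ===== VERDICT (by name: the statement is the Claim_ definition above) =====
theorem build_field_index_map_spec : Claim_equal_build_field_index_map := by
  intro acc header_line _
  unfold Spec_build_field_index_map build_field_index_map build_field_index_map_alt
  set csv := ((PySem.Str.split? header_line "|").getD []).map pvNorm with hcsv
  have hA := pvMainA csv [] PySem.Dict.empty rfl
  have hB := pvMainB csv.length csv
  simp only [List.nil_append] at hA
  rw [hA]
  exact hB.symm
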